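-- pv_equiv track=rewrite | github.com/viveklengure/JobFit-AI | src/company_matcher.py | compress_job
-- ===== SOURCE A (Python) =====
-- REQUIREMENTS_ANCHORS = [
--     "requirements", "qualifications", "what you'll need",
--     "what you need", "you have", "you bring", "must have",
--     "minimum qualifications", "basic qualifications",
--     "what we're looking for", "who you are",
-- ]
--
-- def compress_job(job: dict) -> dict:
--     plain = (job.get("description") or "").strip()
--     plain_lower = plain.lower()
--
--     req_start = len(plain)
--     for anchor in REQUIREMENTS_ANCHORS:
--         idx = plain_lower.find(anchor)
--         if idx != -1 and idx < req_start:
--             req_start = idx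
--
--     if req_start < len(plain) - 100:
--         requirements_text = plain[req_start:req_start + 500]
--     else:
--         requirements_text = plain[-500:]
--
--     return {
--         "title": job.get("title", ""),
--         "location": job.get("location", ""),
--         "department": job.get("department", ""),
--         "applyUrl": job.get("applyUrl", ""),
--         "requirements": requirements_text.strip(),
--     }
-- ===== SOURCE B (Python) =====
-- REQUIREMENTS_ANCHORS = [
--     "requirements", "qualifications", "what you'll need",
--     "what you need", "you have", "you bring", "must have",
--     "minimum qualifications", "basic qualifications",
--     "what we're looking for", "who you are",
-- ]
--
-- _ANCHORS = tuple(REQUIREMENTS_ANCHORS)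
--
--
-- def compress_job(job: dict) -> dict:
--     plain = (job.get("description") or "").strip()
--     low = plain.lower()
--     n = len(plain)
--
--     # leftmost position where any anchor matches: one left-to-right scan
--     # with early exit, instead of one full find() pass per anchor.
--     req_start = next((i for i in range(n) if low.startswith(_ANCHORS, i)), n)
--
--     # single slice: both of A's branches are windows of at most 500 chars
--     start = req_start if req_start < n - 100 else max(n - 500, 0)
--
--     return {
--         "title": job.get("title", ""),
--         "location": job.get("location", ""),
--         "department": job.get("department", ""),
--         "applyUrl": job.get("applyUrl", ""),
--         "requirements": plain[start:start + 500].strip(),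
--     }
-- ===== Notes on version B (the rewrite author's own statement) =====
-- stated objective: alternative
-- what changed: The per-anchor find() loop with a running minimum is replaced by a single left-to-right leftmost-match scan (startswith over a tuple of anchors, early exit), and the two slicing branches are collapsed into one window slice with a computed start.
import Mathlib
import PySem

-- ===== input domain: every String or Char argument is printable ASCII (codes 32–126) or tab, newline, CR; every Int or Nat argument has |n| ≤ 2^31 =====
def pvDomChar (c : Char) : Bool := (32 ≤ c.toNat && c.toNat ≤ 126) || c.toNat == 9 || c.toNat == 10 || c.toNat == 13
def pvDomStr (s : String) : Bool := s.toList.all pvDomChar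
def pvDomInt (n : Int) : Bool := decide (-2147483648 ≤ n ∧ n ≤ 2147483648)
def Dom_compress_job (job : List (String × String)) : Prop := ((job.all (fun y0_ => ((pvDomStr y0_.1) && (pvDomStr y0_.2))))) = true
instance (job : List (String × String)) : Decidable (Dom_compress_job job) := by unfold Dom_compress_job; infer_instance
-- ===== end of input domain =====

-- B replaces A's per-anchor find() loop (running minimum over 11 full scans) by a single
-- left-to-right leftmost-match scan with early exit, and collapses A's two slicing branches
-- into one window slice with a computed start; same return value on every input.

def REQUIREMENTS_ANCHORS : List String :=
  ["requirements", "qualifications", "what you'll need",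
   "what you need", "you have", "you bring", "must have",
   "minimum qualifications", "basic qualifications",
   "what we're looking for", "who you are"]

-- ===== PORT A =====
def compress_job (job : List (String × String)) : List (String × String) :=
  -- '(job.get("description") or "")': on string values 'x or ""' is x itself ("" stays ""),
  -- i.e. exactly the defaulted lookup
  let plain := PySem.Str.strip (PySem.Dict.getD ⟨job⟩ "description" "")
  let plain_lower := PySem.Str.lower plain
  let req_start : Int :=
    REQUIREMENTS_ANCHORS.foldl
      (fun req_start anchor =>
        let idx := PySem.Str.find plain_lower anchor
        if idx ≠ -1 ∧ idx < req_start then idx else req_start)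
      (PySem.Str.len plain)
  let requirements_text :=
    if req_start < PySem.Str.len plain - 100 then
      PySem.Str.slice plain (some req_start) (some (req_start + 500))
    else
      PySem.Str.slice plain (some (-500)) none
  [("title", PySem.Dict.getD ⟨job⟩ "title" ""),
   ("location", PySem.Dict.getD ⟨job⟩ "location" ""),
   ("department", PySem.Dict.getD ⟨job⟩ "department" ""),
   ("applyUrl", PySem.Dict.getD ⟨job⟩ "applyUrl" ""),
   ("requirements", PySem.Str.strip requirements_text)]

-- ===== PORT B =====
-- next((i for i in range(n) if low.startswith(_ANCHORS, i)), n):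
-- first index at which some anchor matches, else the full length
def pvFirstAnchorIdx (anchors : List (List Char)) : List Char → Nat
  | [] => 0
  | c :: t =>
      if anchors.any (fun a => PySem.Chars.startswith (c :: t) a) then 0
      else pvFirstAnchorIdx anchors t + 1

def compress_job_alt (job : List (String × String)) : List (String × String) :=
  let plain := PySem.Str.strip (PySem.Dict.getD ⟨job⟩ "description" "")
  let low := PySem.Str.lower plain
  let n : Int := PySem.Str.len plain
  let req_start : Int :=
    (pvFirstAnchorIdx (REQUIREMENTS_ANCHORS.map String.toList) low.toList : Int)
  let start : Int := if req_start < n - 100 then req_start else max (n - 500) 0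
  [("title", PySem.Dict.getD ⟨job⟩ "title" ""),
   ("location", PySem.Dict.getD ⟨job⟩ "location" ""),
   ("department", PySem.Dict.getD ⟨job⟩ "department" ""),
   ("applyUrl", PySem.Dict.getD ⟨job⟩ "applyUrl" ""),
   ("requirements", PySem.Str.strip (PySem.Str.slice plain (some start) (some (start + 500))))]

-- ===== PRECONDITION & SPEC =====
def Spec_compress_job (job : List (String × String)) (out : List (String × String)) : Prop := out = compress_job_alt job
instance (job : List (String × String)) (out : List (String × String)) : Decidable (Spec_compress_job job out) := by unfold Spec_compress_job; infer_instance

-- ===== CLAIM (what is proved, stated in full; the proofs are below) =====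
def Claim_equal_compress_job : Prop := ∀ (job : List (String × String)), Dom_compress_job job → Spec_compress_job job (compress_job job)

-- ===== LEMMAS AND PROOFS =====

-- A's running-minimum fold: lower bound, minimality, and membership of the result
theorem pvFoldMin (f : String → Int) (l : List String) (r0 : Int) :
    l.foldl (fun r a => if f a ≠ -1 ∧ f a < r then f a else r) r0 ≤ r0 ∧
    (∀ a ∈ l, f a ≠ -1 →
      l.foldl (fun r a => if f a ≠ -1 ∧ f a < r then f a else r) r0 ≤ f a) ∧
    (l.foldl (fun r a => if f a ≠ -1 ∧ f a < r then f a else r) r0 = r0 ∨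
      ∃ a ∈ l, f a ≠ -1 ∧
        l.foldl (fun r a => if f a ≠ -1 ∧ f a < r then f a else r) r0 = f a) := by
  induction l generalizing r0 with
  | nil => exact ⟨le_refl _, by simp, Or.inl rfl⟩
  | cons a t ih =>
    simp only [List.foldl_cons]
    by_cases h : f a ≠ -1 ∧ f a < r0
    · rw [if_pos h]
      obtain ⟨ih1, ih2, ih3⟩ := ih (f a)
      refine ⟨by omega, ?_, ?_⟩
      · intro b hb hfb
        rcases List.mem_cons.1 hb with rfl | hb
        · exact ih1
        · exact ih2 b hb hfb
      · rcases ih3 with hh | ⟨b, hb, hfb, heq⟩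
        · exact Or.inr ⟨a, List.mem_cons_self, h.1, hh⟩
        · exact Or.inr ⟨b, List.mem_cons_of_mem a hb, hfb, heq⟩
    · rw [if_neg h]
      obtain ⟨ih1, ih2, ih3⟩ := ih r0
      refine ⟨ih1, ?_, ?_⟩
      · intro b hb hfb
        rcases List.mem_cons.1 hb with rfl | hb
        · simp only [not_and, not_lt] at h
          have := h hfb
          omega
        · exact ih2 b hb hfb
      · rcases ih3 with hh | ⟨b, hb, hfb, heq⟩
        · exact Or.inl hh
        · exact Or.inr ⟨b, List.mem_cons_of_mem a hb, hfb, heq⟩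

theorem pvScan_le (anchors : List (List Char)) (L : List Char) :
    pvFirstAnchorIdx anchors L ≤ L.length := by
  induction L with
  | nil => simp [pvFirstAnchorIdx]
  | cons c t ih =>
    simp only [pvFirstAnchorIdx]
    split_ifs
    · simp
    · simp
      omega

theorem pvScan_not_before (anchors : List (List Char)) (L : List Char) :
    ∀ j < pvFirstAnchorIdx anchors L, ∀ a ∈ anchors, ¬ a <+: L.drop j := by
  induction L with
  | nil => simp [pvFirstAnchorIdx]
  | cons c t ih =>
    simp only [pvFirstAnchorIdx]
    split_ifs with h
    · simp
    · intro j hj a ha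
      cases j with
      | zero =>
        simp only [List.drop_zero]
        intro hpre
        exact h (List.any_eq_true.2 ⟨a, ha, by
          simpa [PySem.Chars.startswith, List.isPrefixOf_iff_prefix] using hpre⟩)
      | succ k =>
        simpa [List.drop_succ_cons] using ih k (by omega) a ha

theorem pvScan_hit (anchors : List (List Char)) (L : List Char)
    (h : pvFirstAnchorIdx anchors L < L.length) :
    ∃ a ∈ anchors, a <+: L.drop (pvFirstAnchorIdx anchors L) := by
  induction L with
  | nil => simp [pvFirstAnchorIdx] at h
  | cons c t ih =>
    by_cases h' : (anchors.any fun a => PySem.Chars.startswith (c :: t) a) = true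
    · obtain ⟨a, ha, hsw⟩ := List.any_eq_true.1 h'
      refine ⟨a, ha, ?_⟩
      rw [pvFirstAnchorIdx, if_pos h', List.drop_zero]
      simpa [PySem.Chars.startswith, List.isPrefixOf_iff_prefix] using hsw
    · rw [pvFirstAnchorIdx, if_neg h'] at h ⊢
      rw [List.drop_succ_cons]
      exact ih (by simp only [List.length_cons] at h; omega)

theorem pvAnchors_nonempty : ∀ s ∈ REQUIREMENTS_ANCHORS, s.toList ≠ [] := by decide

-- the central fact: A's running minimum of find() equals B's leftmost-match scan
theorem pvMain (p : List Char) :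
    REQUIREMENTS_ANCHORS.foldl
      (fun r a =>
        let idx := PySem.Chars.find (PySem.Chars.lower p) a.toList
        if idx ≠ -1 ∧ idx < r then idx else r) (p.length : Int)
    = (pvFirstAnchorIdx (REQUIREMENTS_ANCHORS.map String.toList) (PySem.Chars.lower p) : Int) := by
  show REQUIREMENTS_ANCHORS.foldl
      (fun r a => if PySem.Chars.find (PySem.Chars.lower p) a.toList ≠ -1 ∧
          PySem.Chars.find (PySem.Chars.lower p) a.toList < r then
          PySem.Chars.find (PySem.Chars.lower p) a.toList else r) (p.length : Int) = _
  set L := PySem.Chars.lower p with hL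
  have hlen : L.length = p.length := by simp [hL, PySem.Chars.lower]
  set m := pvFirstAnchorIdx (REQUIREMENTS_ANCHORS.map String.toList) L with hm
  obtain ⟨h1, h2, h3⟩ :=
    pvFoldMin (fun a => PySem.Chars.find L a.toList) REQUIREMENTS_ANCHORS (p.length : Int)
  have hm_le : m ≤ L.length := pvScan_le _ _
  have hnb := pvScan_not_before (REQUIREMENTS_ANCHORS.map String.toList) L
  -- any successful find lies at or beyond m
  have hge : ∀ b ∈ REQUIREMENTS_ANCHORS, PySem.Chars.find L b.toList ≠ -1 →
      (m : Int) ≤ PySem.Chars.find L b.toList := by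
    intro b hb hfb
    have h0 : 0 ≤ PySem.Chars.find L b.toList := by
      have := PySem.Chars.neg_one_le_find L b.toList; omega
    have hspec := PySem.Chars.find_spec (s := L) (sub := b.toList) h0
    by_contra hlt
    have hlt' : (PySem.Chars.find L b.toList).toNat < m := by omega
    exact hnb _ hlt' b.toList (List.mem_map_of_mem hb) hspec.1
  rcases Nat.lt_or_ge m L.length with hcase | hcase
  · -- a match exists at position m
    obtain ⟨a, ha, hpre⟩ := pvScan_hit _ _ hcase
    obtain ⟨s, hs, rfl⟩ := List.mem_map.1 ha
    have hinf : s.toList <:+: L := hpre.isInfix.trans (List.drop_suffix m L).isInfix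
    have hne : PySem.Chars.find L s.toList ≠ -1 :=
      (PySem.Chars.find_ne_neg_one_iff L s.toList).2 hinf
    have h0 : 0 ≤ PySem.Chars.find L s.toList := by
      have := PySem.Chars.neg_one_le_find L s.toList; omega
    have hspec := PySem.Chars.find_spec (s := L) (sub := s.toList) h0
    have hfind_le : PySem.Chars.find L s.toList ≤ (m : Int) := by
      by_contra h'
      exact hspec.2 m (by omega) hpre
    have hF_le : _ ≤ (m : Int) := le_trans (h2 s hs hne) hfind_le
    rcases h3 with hF | ⟨b, hb, hfb, heq⟩
    · omega
    · have := hge b hb hfb; omega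
  · -- no match anywhere: every find is -1 and the fold keeps len(plain)
    have hmn : m = L.length := le_antisymm hm_le hcase
    rcases h3 with hF | ⟨b, hb, hfb, heq⟩
    · rw [hF]; omega
    · exfalso
      have h0 : 0 ≤ PySem.Chars.find L b.toList := by
        have := PySem.Chars.neg_one_le_find L b.toList; omega
      have hspec := PySem.Chars.find_spec (s := L) (sub := b.toList) h0
      have hk : (PySem.Chars.find L b.toList).toNat < L.length := by
        have hlenle := hspec.1.length_le
        have hbne : b.toList ≠ [] := pvAnchors_nonempty b hb
        have : 0 < b.toList.length := List.length_pos_iff.2 hbne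
        have := List.length_drop (l := L) (i := (PySem.Chars.find L b.toList).toNat)
        omega
      exact hnb _ (by omega) b.toList (List.mem_map_of_mem hb) hspec.1

-- A's tail slice plain[-500:] equals B's 500-wide window from max(n-500, 0)
theorem pvSliceLast (p : List Char) :
    PySem.Chars.slice p (some (-500)) none
    = PySem.Chars.slice p (some (max ((p.length : Int) - 500) 0))
        (some (max ((p.length : Int) - 500) 0 + 500)) := by
  simp only [PySem.Chars.slice_eq_listSlice, PySem.List.slice, PySem.List.clampIdx]
  have h1 : (if (-500 : Int) < 0 then if (p.length : Int) + -500 < 0 then 0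
      else ((p.length : Int) + -500).toNat else min (-500 : Int).toNat p.length)
      = (max ((p.length : Int) - 500) 0).toNat := by
    split_ifs <;> omega
  have h2 : (if max ((p.length : Int) - 500) 0 < 0 then
      if (p.length : Int) + max ((p.length : Int) - 500) 0 < 0 then 0
      else ((p.length : Int) + max ((p.length : Int) - 500) 0).toNat
      else min (max ((p.length : Int) - 500) 0).toNat p.length)
      = (max ((p.length : Int) - 500) 0).toNat := by
    split_ifs <;> omega
  have h3 : (if max ((p.length : Int) - 500) 0 + 500 < 0 then
      if (p.length : Int) + (max ((p.length : Int) - 500) 0 + 500) < 0 then 0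
      else ((p.length : Int) + (max ((p.length : Int) - 500) 0 + 500)).toNat
      else min (max ((p.length : Int) - 500) 0 + 500).toNat p.length)
      = p.length := by
    split_ifs <;> omega
  rw [h1, h2, h3]

-- ===== VERDICT (by name: the statement is the Claim_ definition above) =====
theorem compress_job_spec : Claim_equal_compress_job := by
  intro job _
  unfold Spec_compress_job compress_job compress_job_alt
  simp only [PySem.Str.find, PySem.Str.len, PySem.Str.toList_lower]
  rw [pvMain]
  simp only [List.cons.injEq, Prod.mk.injEq, and_true, true_and]
  split_ifs with h
  · rfl
  · simp only [PySem.Str.strip, PySem.Str.slice]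
    rw [pvSliceLast]
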